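-- pv_equiv track=rewrite | github.com/ezerc/Qiskit_Projects | QAOA_Number_Partition_Problem/number_partition_qaoa.py | fully_connected_model
-- ===== SOURCE A (Python) =====
-- def fully_connected_model(S):
--     ''' Given a set, this function constructs the edges of a fully connected graph, and an
--     interaction matrix based on the Ising Hamiltonian formulation of the number partition
--     problem. Our convention is such that in this matrix is upper triangular.
--
--     Args:
--         -S: set containing all elements of the number partition problem
--     '''
--
--     # Number of nodes in the graph
--     n = len(S)
--
--     J = [[] for _ in range(n)]
--     E = []
--
--
--     for i in range(n):
--         for j in range(n):
--
--             # Diagonal terms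
--             if j == i:
--                 J[i].append(S[i]**2)
--
--             # Upper triangular section contains all interactions
--             elif j > i:
--                 J[i].append(2*S[i]*S[j])
--                 E.append([i,j])
--
--             # Bottom triangular section set to 0
--             elif j < i:
--                 J[i].append(0)
--
--     return E,J
-- ===== SOURCE B (Python) =====
-- def fully_connected_model(S):
--     # Stage 1: structural right fold over S building the *relative* rows:
--     # rows[i] = [S[i]**2, 2*S[i]*S[i+1], ..., 2*S[i]*S[n-1]] (no index arithmetic).
--     rows, suf = [], []
--     for x in reversed(S):
--         rows = [[x * x] + [2 * x * y for y in suf]] + rows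
--         suf = [x] + suf
--     # Stage 2: decorate — pad row i with i leading zeros; read the edges off
--     # the row shapes: row i of length L contributes edges [i, i+1..i+L-1].
--     J = [[0] * i + r for i, r in enumerate(rows)]
--     E = [[i, i + k] for i, r in enumerate(rows) for k in range(1, len(r))]
--     return E, J
-- ===== Notes on version B (the rewrite author's own statement) =====
-- stated objective: alternative
-- what changed: Replaces A's index-driven n x n scan with a three-way sign branch by two stages: a structural right fold over the list builds the relative rows (no pair of indices is ever compared), and one decorate pass pads each row with leading zeros and reads the edge list off the row shapes.
import Mathlib
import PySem

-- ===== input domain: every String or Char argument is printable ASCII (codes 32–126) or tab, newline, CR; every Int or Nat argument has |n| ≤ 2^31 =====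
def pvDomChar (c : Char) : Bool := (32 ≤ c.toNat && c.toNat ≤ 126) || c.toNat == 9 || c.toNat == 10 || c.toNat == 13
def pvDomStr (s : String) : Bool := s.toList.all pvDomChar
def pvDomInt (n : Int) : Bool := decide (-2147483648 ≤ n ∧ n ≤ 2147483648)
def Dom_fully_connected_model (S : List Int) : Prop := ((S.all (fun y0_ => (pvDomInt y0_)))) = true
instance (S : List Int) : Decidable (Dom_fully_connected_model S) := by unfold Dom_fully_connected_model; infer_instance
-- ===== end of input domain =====

-- B replaces A's index-driven n×n scan with a three-way sign branch by two stages: a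
-- structural right fold over S building the relative rows, then one decorate pass that
-- pads each row with leading zeros and reads the edges off the row shapes (objective:
-- alternative decomposition).

-- ===== PORT A =====
-- Python list mutation J[i].append(x) is ported as functional update: set i (getD i [] ++ [x]).
def fully_connected_model (S : List Int) : List (List Int) × List (List Int) :=
  let n := S.length
  let res := (List.range n).foldl (fun (st : List (List Int) × List (List Int)) i =>
      (List.range n).foldl (fun st j =>
        if j = i then
          (st.1.set i ((st.1.getD i []) ++ [(S.getD i 0) ^ 2]), st.2)
        else if i < j then
          (st.1.set i ((st.1.getD i []) ++ [2 * (S.getD i 0) * (S.getD j 0)]),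
           st.2 ++ [[(i : Int), (j : Int)]])
        else
          (st.1.set i ((st.1.getD i []) ++ [0]), st.2)) st)
    ((List.range n).map (fun _ => ([] : List Int)), ([] : List (List Int)))
  (res.2, res.1)

-- ===== PORT B =====
-- Source B's loop 'for x in reversed(S)' over the state (rows, suf) is the foldl over S.reverse;
-- enumerate is PySem.List.enumerate ([0]*i uses the enumerate index, always ≥ 0, via toNat);
-- range(1, len(r)) is ported as List.range' 1 (r.length - 1).
def fully_connected_model_alt (S : List Int) : List (List Int) × List (List Int) :=
  let st := S.reverse.foldl
    (fun (st : List (List Int) × List Int) x =>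
      ((x * x :: st.2.map (fun y => 2 * x * y)) :: st.1, x :: st.2))
    ([], [])
  let rows := st.1
  let J := (PySem.List.enumerate rows 0).map (fun p => List.replicate p.1.toNat (0 : Int) ++ p.2)
  let E := (PySem.List.enumerate rows 0).flatMap (fun p =>
      (List.range' 1 (p.2.length - 1)).map (fun k : Nat => [p.1, p.1 + (k : Int)]))
  (E, J)

-- ===== PRECONDITION & SPEC =====
def Spec_fully_connected_model (S : List Int) (out : List (List Int) × List (List Int)) : Prop := out = fully_connected_model_alt S
instance (S : List Int) (out : List (List Int) × List (List Int)) : Decidable (Spec_fully_connected_model S out) := by unfold Spec_fully_connected_model; infer_instance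

-- ===== CLAIM (what is proved, stated in full; the proofs are below) =====
def Claim_equal_fully_connected_model : Prop := ∀ (S : List Int), Dom_fully_connected_model S → Spec_fully_connected_model S (fully_connected_model S)

-- ===== LEMMAS AND PROOFS =====

-- The value A appends to row i at column j.
def pvCell (S : List Int) (i j : Nat) : Int :=
  if j = i then (S.getD i 0) ^ 2
  else if i < j then 2 * (S.getD i 0) * (S.getD j 0)
  else 0

-- The final row i of the closed form: i zeros, then its relative part pvRel.
def pvRel (S : List Int) (n i : Nat) : List Int :=
  [(S.getD i 0) ^ 2]
    ++ (List.range' (i + 1) (n - (i + 1))).map (fun j => 2 * (S.getD i 0) * (S.getD j 0))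

def pvRow (S : List Int) (n i : Nat) : List Int :=
  List.replicate i (0 : Int) ++ pvRel S n i

def pvEdges (n i : Nat) : List (List Int) :=
  (List.range' (i + 1) (n - (i + 1))).map (fun j : Nat => [(i : Int), (j : Int)])

-- A's inner loop over any column list `js`: appends `js.map (pvCell S i)` to row i and
-- the upper-triangle edges to E.
theorem pv_inner (S : List Int) (i : Nat) :
    ∀ (js : List Nat) (st : List (List Int) × List (List Int)), i < st.1.length →
      js.foldl (fun st j =>
        if j = i then
          (st.1.set i ((st.1.getD i []) ++ [(S.getD i 0) ^ 2]), st.2)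
        else if i < j then
          (st.1.set i ((st.1.getD i []) ++ [2 * (S.getD i 0) * (S.getD j 0)]),
           st.2 ++ [[(i : Int), (j : Int)]])
        else
          (st.1.set i ((st.1.getD i []) ++ [0]), st.2)) st
      = (st.1.set i ((st.1.getD i []) ++ js.map (pvCell S i)),
         st.2 ++ ((js.filter (fun j => decide (i < j))).map (fun j : Nat => [(i : Int), (j : Int)]))) := by
  intro js
  induction js with
  | nil =>
    intro st h
    simp only [List.foldl_nil, List.map_nil, List.append_nil, List.filter_nil]
    rw [List.getD_eq_getElem?_getD, List.getElem?_eq_getElem h]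
    simp [List.set_getElem_self h]
  | cons j js ih =>
    intro st h
    simp only [List.foldl_cons]
    by_cases hji : j = i
    · rw [if_pos hji]
      rw [ih _ (by simpa using h)]
      have hg : ((st.1.set i ((st.1.getD i []) ++ [(S.getD i 0) ^ 2])).getD i []) =
          (st.1.getD i []) ++ [(S.getD i 0) ^ 2] := by
        rw [List.getD_eq_getElem?_getD, List.getElem?_set_self (by simpa using h)]
        rfl
      rw [hg, List.set_set]
      simp [pvCell, hji]
    · by_cases hij : i < j
      · rw [if_neg hji, if_pos hij]
        rw [ih _ (by simpa using h)]
        have hg : ((st.1.set i ((st.1.getD i []) ++ [2 * (S.getD i 0) * (S.getD j 0)])).getD i []) =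
            (st.1.getD i []) ++ [2 * (S.getD i 0) * (S.getD j 0)] := by
          rw [List.getD_eq_getElem?_getD, List.getElem?_set_self (by simpa using h)]
          rfl
        rw [hg, List.set_set]
        simp [pvCell, hji, hij]
      · rw [if_neg hji, if_neg hij]
        rw [ih _ (by simpa using h)]
        have hg : ((st.1.set i ((st.1.getD i []) ++ [0])).getD i []) =
            (st.1.getD i []) ++ [0] := by
          rw [List.getD_eq_getElem?_getD, List.getElem?_set_self (by simpa using h)]
          rfl
        rw [hg, List.set_set]
        simp [pvCell, hji, hij]

-- The full column range, mapped through pvCell, is exactly row i of the closed form (i < n).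
theorem pv_row_eq (S : List Int) (n i : Nat) (hi : i < n) :
    (List.range n).map (pvCell S i) = pvRow S n i := by
  have hsplit : List.range n = List.range' 0 i ++ ([i] ++ List.range' (i + 1) (n - (i + 1))) := by
    rw [List.range_eq_range']
    have h1 : ([i] ++ List.range' (i + 1) (n - (i + 1))) = List.range' i (1 + (n - (i + 1))) := by
      rw [← List.range'_append]; simp
    rw [h1]
    have := @List.range'_append 0 i (1 + (n - (i + 1))) 1
    simp only [one_mul, zero_add] at this
    rw [this]
    congr 1
    omega
  rw [hsplit, List.map_append, List.map_append]
  have h0 : (List.range' 0 i).map (pvCell S i) = List.replicate i (0 : Int) := by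
    rw [List.map_congr_left (g := fun _ => (0 : Int)) (by
      intro a ha
      rw [List.mem_range'_1] at ha
      simp only [pvCell]
      rw [if_neg (by omega), if_neg (by omega)])]
    simp [List.map_const']
  have hd : ([i].map (pvCell S i)) = [(S.getD i 0) ^ 2] := by simp [pvCell]
  have hu : (List.range' (i + 1) (n - (i + 1))).map (pvCell S i)
      = (List.range' (i + 1) (n - (i + 1))).map (fun j => 2 * (S.getD i 0) * (S.getD j 0)) := by
    apply List.map_congr_left
    intro a ha
    rw [List.mem_range'_1] at ha
    simp only [pvCell]
    rw [if_neg (by omega), if_pos (by omega)]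
  rw [h0, hd, hu]
  simp [pvRow, pvRel]

-- The filtered column range gives exactly the closed form's edges for row i (i < n).
theorem pv_edges_eq (n i : Nat) (hi : i < n) :
    ((List.range n).filter (fun j => decide (i < j))).map (fun j : Nat => [(i : Int), (j : Int)])
      = pvEdges n i := by
  have hsplit : List.range n = List.range' 0 i ++ ([i] ++ List.range' (i + 1) (n - (i + 1))) := by
    rw [List.range_eq_range']
    have h1 : ([i] ++ List.range' (i + 1) (n - (i + 1))) = List.range' i (1 + (n - (i + 1))) := by
      rw [← List.range'_append]; simp
    rw [h1]
    have := @List.range'_append 0 i (1 + (n - (i + 1))) 1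
    simp only [one_mul, zero_add] at this
    rw [this]
    congr 1
    omega
  rw [hsplit, List.filter_append, List.filter_append]
  have h0 : (List.range' 0 i).filter (fun j => decide (i < j)) = [] := by
    rw [List.filter_congr (q := fun _ => false) (by
      intro a ha
      rw [List.mem_range'_1] at ha
      simp; omega)]
    exact List.filter_false _
  have hd : ([i].filter (fun j => decide (i < j))) = [] := by simp
  have hu : (List.range' (i + 1) (n - (i + 1))).filter (fun j => decide (i < j))
      = List.range' (i + 1) (n - (i + 1)) := by
    rw [List.filter_congr (q := fun _ => true) (by
      intro a ha
      rw [List.mem_range'_1] at ha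
      simp; omega)]
    exact List.filter_true _
  rw [h0, hd, hu]
  rfl

-- A's outer-loop invariant: after processing rows 0..m-1, J holds the closed form's first m
-- rows followed by n-m still-empty rows, and E holds its edges for those rows.
theorem pv_outer (S : List Int) (m : Nat) (hm : m ≤ S.length) :
    (List.range m).foldl (fun (st : List (List Int) × List (List Int)) i =>
        (List.range S.length).foldl (fun st j =>
          if j = i then
            (st.1.set i ((st.1.getD i []) ++ [(S.getD i 0) ^ 2]), st.2)
          else if i < j then
            (st.1.set i ((st.1.getD i []) ++ [2 * (S.getD i 0) * (S.getD j 0)]),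
             st.2 ++ [[(i : Int), (j : Int)]])
          else
            (st.1.set i ((st.1.getD i []) ++ [0]), st.2)) st)
      ((List.range S.length).map (fun _ => ([] : List Int)), ([] : List (List Int)))
    = ((List.range m).map (pvRow S S.length) ++ List.replicate (S.length - m) ([] : List Int),
       (List.range m).flatMap (pvEdges S.length)) := by
  induction m with
  | zero =>
    simp
  | succ m ih =>
    have hm' : m ≤ S.length := by omega
    rw [List.range_succ, List.foldl_append, ih hm']
    simp only [List.foldl_cons, List.foldl_nil]
    have hlen : ((List.range m).map (pvRow S S.length)
        ++ List.replicate (S.length - m) ([] : List Int)).length = S.length := by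
      simp; omega
    rw [pv_inner S m _ _ (by rw [hlen]; omega)]
    have hgd : (((List.range m).map (pvRow S S.length)
        ++ List.replicate (S.length - m) ([] : List Int)).getD m []) = ([] : List Int) := by
      rw [List.getD_eq_getElem?_getD, List.getElem?_append_right (by simp)]
      simp only [List.length_map, List.length_range]
      rw [List.getElem?_replicate]
      rw [if_pos (by omega)]
      rfl
    rw [hgd]
    simp only [List.nil_append]
    rw [pv_row_eq S S.length m (by omega), pv_edges_eq S.length m (by omega)]
    simp only [Prod.mk.injEq]
    constructor
    · rw [List.set_append]
      rw [if_neg (by simp)]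
      simp only [List.length_map, List.length_range, Nat.sub_self]
      have hrep : List.replicate (S.length - m) ([] : List Int)
          = ([] : List Int) :: List.replicate (S.length - (m + 1)) ([] : List Int) := by
        have : S.length - m = (S.length - (m + 1)) + 1 := by omega
        rw [this, List.replicate_succ]
      rw [hrep]
      simp
    · rw [List.flatMap_append]
      simp

-- map over range of getD is map (used for the head-row lemma).
theorem pv_map_getD_range {α β : Type} (L : List α) (d : α) (f : α → β) :
    (List.range L.length).map (fun j => f (L.getD j d)) = L.map f := by
  induction L with
  | nil => simp
  | cons a l ih =>
    simp only [List.length_cons, List.range_succ_eq_map, List.map_cons, List.map_map]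
    simp only [List.getD_cons_zero, List.cons.injEq, true_and]
    exact ih

-- B's head row is the relative row 0 of the closed form.
theorem pv_rel_head (x : Int) (rest : List Int) :
    pvRel (x :: rest) (rest.length + 1) 0 = x * x :: rest.map (fun y => 2 * x * y) := by
  simp only [pvRel, List.getD_cons_zero, Nat.add_sub_cancel, List.cons_append,
    List.nil_append, List.cons.injEq]
  constructor
  · ring
  · have h2 : List.range' 1 rest.length = (List.range' 0 rest.length).map (fun j => 1 + j) := by
      rw [List.map_add_range']
    rw [h2, List.map_map, ← List.range_eq_range']
    have := pv_map_getD_range rest 0 (fun y => 2 * x * y)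
    rw [← this]
    apply List.map_congr_left
    intro a _
    simp [Nat.add_comm 1]

-- Dropping the head shifts the relative rows: row i+1 of x::rest is row i of rest.
theorem pv_rel_shift (x : Int) (rest : List Int) (i : Nat) :
    pvRel (x :: rest) (rest.length + 1) (i + 1) = pvRel rest rest.length i := by
  simp only [pvRel, List.cons_append, List.nil_append, List.cons.injEq]
  constructor
  · rfl
  · have h1 : rest.length + 1 - (i + 1 + 1) = rest.length - (i + 1) := by omega
    rw [h1]
    have h2 : List.range' (i + 1 + 1) (rest.length - (i + 1))
        = (List.range' (i + 1) (rest.length - (i + 1))).map (fun j => 1 + j) := by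
      rw [List.map_add_range']; congr 1; omega
    rw [h2, List.map_map]
    simp [Nat.add_comm 1]

-- B's stage-1 fold (as a foldr) computes the relative rows together with the suffix.
theorem pv_fold (S : List Int) :
    S.foldr (fun x (st : List (List Int) × List Int) =>
      ((x * x :: st.2.map (fun y => 2 * x * y)) :: st.1, x :: st.2)) ([], [])
    = ((List.range S.length).map (pvRel S S.length), S) := by
  induction S with
  | nil => simp
  | cons x rest ih =>
    simp only [List.foldr_cons, ih]
    refine Prod.ext ?_ rfl
    show (x * x :: rest.map (fun y => 2 * x * y))
        :: (List.range rest.length).map (pvRel rest rest.length)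
      = (List.range (x :: rest).length).map (pvRel (x :: rest) (x :: rest).length)
    rw [List.length_cons, List.range_succ_eq_map, List.map_cons, List.map_map]
    congr 1
    · exact (pv_rel_head x rest).symm
    · apply List.map_congr_left
      intro i _
      simp only [Function.comp_apply]
      exact (pv_rel_shift x rest i).symm

-- enumerate commutes with map.
theorem pv_enum_map {α β : Type} (f : α → β) :
    ∀ (l : List α) (s : Int),
      PySem.List.enumerate (l.map f) s
        = (PySem.List.enumerate l s).map (fun p => (p.1, f p.2)) := by
  intro l
  induction l with
  | nil => intro s; simp [PySem.List.enumerate_nil]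
  | cons a l ih =>
    intro s
    rw [List.map_cons, PySem.List.enumerate_cons, PySem.List.enumerate_cons, List.map_cons,
      ih (s + 1)]

-- enumerate of range n from 0 pairs each index with itself (as an Int).
theorem pv_enum_range (n : Nat) :
    PySem.List.enumerate (List.range n) 0 = (List.range n).map (fun i : Nat => ((i : Int), i)) := by
  induction n with
  | zero => simp [PySem.List.enumerate_nil]
  | succ n ih =>
    rw [List.range_succ, PySem.List.enumerate_append, ih]
    simp [PySem.List.enumerate_cons, PySem.List.enumerate_nil]

-- B's stage-2 decorate pass on the relative rows yields the closed form's rows.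
theorem pv_decorate_rows (S : List Int) :
    (PySem.List.enumerate ((List.range S.length).map (pvRel S S.length)) 0).map
        (fun p => List.replicate p.1.toNat (0 : Int) ++ p.2)
      = (List.range S.length).map (pvRow S S.length) := by
  rw [pv_enum_map, pv_enum_range, List.map_map, List.map_map]
  apply List.map_congr_left
  intro i _
  simp [pvRow]

-- B's stage-2 edge pass reads the closed form's edges off the relative row shapes.
theorem pv_decorate_edges (S : List Int) :
    (PySem.List.enumerate ((List.range S.length).map (pvRel S S.length)) 0).flatMap
        (fun p => (List.range' 1 (p.2.length - 1)).map (fun k : Nat => [p.1, p.1 + (k : Int)]))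
      = (List.range S.length).flatMap (pvEdges S.length) := by
  rw [pv_enum_map, pv_enum_range, List.map_map, List.flatMap_map]
  apply List.flatMap_congr
  intro i hi
  rw [List.mem_range] at hi
  simp only [Function.comp_apply]
  have hlen : (pvRel S S.length i).length - 1 = S.length - (i + 1) := by
    simp [pvRel]
  rw [hlen]
  have h2 : List.range' (i + 1) (S.length - (i + 1))
      = (List.range' 1 (S.length - (i + 1))).map (fun k => i + k) := by
    rw [List.map_add_range']
  rw [pvEdges, h2, List.map_map]
  apply List.map_congr_left
  intro k _
  simp only [Function.comp_apply]
  push_cast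
  rfl

-- ===== VERDICT (by name: the statement is the Claim_ definition above) =====
theorem fully_connected_model_spec : Claim_equal_fully_connected_model := by
  intro S _
  unfold Spec_fully_connected_model fully_connected_model fully_connected_model_alt
  simp only
  rw [pv_outer S S.length le_rfl]
  simp only [Nat.sub_self, List.replicate_zero, List.append_nil]
  rw [List.foldl_reverse, pv_fold]
  rw [pv_decorate_rows, pv_decorate_edges]
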